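-- pv_equiv track=rewrite | github.com/sruinz/MediaNab | extension/companion/medianab_host.py | remove_ytdlp_format_args
-- ===== SOURCE A (Python) =====
-- def remove_ytdlp_format_args(cmd):
--     result = []
--     skip_next = False
--     for token in cmd:
--         if skip_next:
--             skip_next = False
--             continue
--         if token in ('-f', '--format'):
--             skip_next = True
--             continue
--         if str(token).startswith('--format='):
--             continue
--         result.append(token)
--     return result
-- ===== SOURCE B (Python) =====
-- def remove_ytdlp_format_args(cmd):
--     # Staged, stateless-filter approach: a token is consumed as a flag's VALUE
--     # exactly when the run of consecutive -f/--format tokens immediately before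
--     # it has odd length (each flag consumes the next token, and a consumed flag
--     # consumes nothing).  So: pass 1 marks flag tokens, pass 2 records the
--     # length of the flag run preceding each position, pass 3 keeps the tokens
--     # whose preceding run is even and which are not themselves a flag or
--     # a --format= option.
--     flags = [t in ('-f', '--format') for t in cmd]
--     runs = []
--     r = 0
--     for f in flags:
--         runs.append(r)
--         r = r + 1 if f else 0
--     return [t for t, f, r in zip(cmd, flags, runs)
--             if r % 2 == 0 and not f and not str(t).startswith('--format=')]
-- ===== Notes on version B (the rewrite author's own statement) =====
-- stated objective: alternative
-- what changed: Replaces A's carried skip_next state machine with a staged, stateless characterization: mark flag tokens, compute the length of the consecutive-flag run preceding each position, then keep exactly the tokens whose preceding run is even and which are not themselves a flag or a --format= option.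
import Mathlib
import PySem

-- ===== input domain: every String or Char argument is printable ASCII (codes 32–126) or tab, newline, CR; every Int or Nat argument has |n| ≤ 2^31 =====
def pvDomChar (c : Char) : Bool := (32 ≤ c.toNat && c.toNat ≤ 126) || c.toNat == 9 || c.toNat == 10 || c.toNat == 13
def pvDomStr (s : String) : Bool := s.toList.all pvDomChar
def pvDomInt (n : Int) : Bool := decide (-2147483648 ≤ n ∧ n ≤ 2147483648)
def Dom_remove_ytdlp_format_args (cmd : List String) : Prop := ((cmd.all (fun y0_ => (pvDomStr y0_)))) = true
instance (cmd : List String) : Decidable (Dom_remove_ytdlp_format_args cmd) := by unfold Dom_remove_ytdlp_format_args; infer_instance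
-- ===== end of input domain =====

-- B replaces A's carried skip_next state machine with a staged, stateless filter based on
-- the parity of the consecutive-flag run preceding each token (alternative decomposition).

-- ===== PORT A =====
-- `token in ('-f', '--format')`
def pvIsFlag (token : String) : Bool := token == "-f" || token == "--format"

-- `str(token).startswith('--format=')`
def pvIsFmtEq (token : String) : Bool := PySem.Str.startswith token "--format="

-- one step of A's for-loop: state = (result, skip_next)
def pvStepA (s : List String × Bool) (token : String) : List String × Bool :=
  if s.2 then (s.1, false)
  else if pvIsFlag token then (s.1, true)
  else if pvIsFmtEq token then s
  else (s.1 ++ [token], s.2)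

def remove_ytdlp_format_args (cmd : List String) : List String :=
  (cmd.foldl pvStepA ([], false)).1

-- ===== PORT B =====
-- `t in ('-f', '--format')` (B's marking pass)
def pvIsFlagB (t : String) : Bool := t == "-f" || t == "--format"

-- `str(t).startswith('--format=')` (B's filter)
def pvIsFmtEqB (t : String) : Bool := PySem.Str.startswith t "--format="

def remove_ytdlp_format_args_alt (cmd : List String) : List String :=
  -- flags = [t in ('-f','--format') for t in cmd]
  let flags := cmd.map pvIsFlagB
  -- runs: for f in flags: runs.append(r); r = r + 1 if f else 0
  let runs := (flags.foldl (fun (p : List Nat × Nat) f =>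
      (p.1 ++ [p.2], if f then p.2 + 1 else 0)) ([], 0)).1
  -- [t for t, f, r in zip(cmd, flags, runs) if r % 2 == 0 and not f and not str(t).startswith('--format=')]
  ((cmd.zip (flags.zip runs)).filter
      (fun x => x.2.2 % 2 == 0 && !x.2.1 && !pvIsFmtEqB x.1)).map (·.1)

-- ===== PRECONDITION & SPEC =====
def Spec_remove_ytdlp_format_args (cmd : List String) (out : List String) : Prop := out = remove_ytdlp_format_args_alt cmd
instance (cmd : List String) (out : List String) : Decidable (Spec_remove_ytdlp_format_args cmd out) := by unfold Spec_remove_ytdlp_format_args; infer_instance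

-- ===== CLAIM (what is proved, stated in full; the proofs are below) =====
def Claim_equal_remove_ytdlp_format_args : Prop := ∀ (cmd : List String), Dom_remove_ytdlp_format_args cmd → Spec_remove_ytdlp_format_args cmd (remove_ytdlp_format_args cmd)

-- ===== LEMMAS AND PROOFS =====

-- reference: filtering with the preceding-flag-run counter threaded through
def pvG : List String → Nat → List String
  | [], _ => []
  | t :: rest, r =>
    (if r % 2 == 0 && !pvIsFlagB t && !pvIsFmtEqB t then [t] else []) ++
      pvG rest (if pvIsFlagB t then r + 1 else 0)

-- the run-length scan written as a recursion
def pvRuns : List Bool → Nat → List Nat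
  | [], _ => []
  | f :: rest, r => r :: pvRuns rest (if f then r + 1 else 0)

lemma pvFlag_eq (t : String) : pvIsFlag t = pvIsFlagB t := rfl

lemma pvFmt_eq (t : String) : pvIsFmtEq t = pvIsFmtEqB t := rfl

lemma scan_eq (fs : List Bool) : ∀ (r : Nat) (acc : List Nat),
    (fs.foldl (fun (p : List Nat × Nat) f =>
      (p.1 ++ [p.2], if f then p.2 + 1 else 0)) (acc, r)).1 = acc ++ pvRuns fs r := by
  induction fs with
  | nil => intro r acc; simp [pvRuns]
  | cons f rest ih =>
    intro r acc
    simp only [List.foldl_cons, pvRuns]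
    rw [ih]
    simp

lemma zipfilter_eq (cmd : List String) : ∀ (r : Nat),
    ((cmd.zip ((cmd.map pvIsFlagB).zip (pvRuns (cmd.map pvIsFlagB) r))).filter
      (fun x => x.2.2 % 2 == 0 && !x.2.1 && !pvIsFmtEqB x.1)).map (·.1)
    = pvG cmd r := by
  induction cmd with
  | nil => intro r; simp [pvG]
  | cons t rest ih =>
    intro r
    simp only [List.map_cons]
    rw [show pvRuns (pvIsFlagB t :: List.map pvIsFlagB rest) r = r :: pvRuns (List.map pvIsFlagB rest) (if pvIsFlagB t then r + 1 else 0) from rfl]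
    simp only [List.zip_cons_cons, List.filter_cons]
    by_cases h : (r % 2 == 0 && !pvIsFlagB t && !pvIsFmtEqB t) = true
    · simp [pvG, h, ih]
    · simp [pvG, h, ih]

-- A's fold equals pvG: A's skip_next boolean is the parity of the preceding flag run
lemma foldA_eq (cmd : List String) : ∀ (r : Nat) (res : List String),
    (cmd.foldl pvStepA (res, r % 2 == 1)).1 = res ++ pvG cmd r := by
  induction cmd with
  | nil => intro r res; simp [pvG]
  | cons t rest ih =>
    intro r res
    rcases Nat.mod_two_eq_zero_or_one r with heven | hodd
    · have hb : (r % 2 == 1) = false := by simp [heven]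
      by_cases hf : pvIsFlagB t = true
      · -- flag token: A sets skip_next; B's next run parity is odd
        have hstep : pvStepA (res, r % 2 == 1) t = (res, true) := by
          simp [pvStepA, hb, pvFlag_eq, hf]
        have h1 : ((r + 1) % 2 == 1) = true := by simp; omega
        have hpg : pvG (t :: rest) r = pvG rest (r + 1) := by
          simp [pvG, hf]
        have hih := ih (r + 1) res
        rw [h1] at hih
        rw [List.foldl_cons, hstep, hih, hpg]
      · rw [Bool.not_eq_true] at hf
        by_cases hs : pvIsFmtEqB t = true
        · -- --format= token: dropped, state unchanged
          have hstep : pvStepA (res, r % 2 == 1) t = (res, r % 2 == 1) := by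
            simp [pvStepA, hb, pvFlag_eq, hf, pvFmt_eq, hs]
          have hpg : pvG (t :: rest) r = pvG rest 0 := by
            simp [pvG, hf, hs]
          have hih := ih 0 res
          rw [show ((0 : Nat) % 2 == 1) = false from rfl] at hih
          rw [List.foldl_cons, hstep, hb, hih, hpg]
        · -- ordinary token: kept by both
          rw [Bool.not_eq_true] at hs
          have hstep : pvStepA (res, r % 2 == 1) t = (res ++ [t], r % 2 == 1) := by
            simp [pvStepA, hb, pvFlag_eq, hf, pvFmt_eq, hs]
          have hpg : pvG (t :: rest) r = t :: pvG rest 0 := by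
            simp [pvG, hf, hs, heven]
          have hih := ih 0 (res ++ [t])
          rw [show ((0 : Nat) % 2 == 1) = false from rfl] at hih
          rw [List.foldl_cons, hstep, hb, hih, hpg]
          simp
    · -- skip_next is true: token consumed as a value; next parity is even either way
      have hb : (r % 2 == 1) = true := by simp [hodd]
      have hstep : pvStepA (res, r % 2 == 1) t = (res, false) := by
        simp [pvStepA, hb]
      by_cases hf : pvIsFlagB t = true
      · have hpg : pvG (t :: rest) r = pvG rest (r + 1) := by
          simp [pvG, hodd, hf]
        have h1 : ((r + 1) % 2 == 1) = false := by simp; omega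
        have hih := ih (r + 1) res
        rw [h1] at hih
        rw [List.foldl_cons, hstep, hih, hpg]
      · rw [Bool.not_eq_true] at hf
        have hpg : pvG (t :: rest) r = pvG rest 0 := by
          simp [pvG, hodd, hf]
        have hih := ih 0 res
        rw [show ((0 : Nat) % 2 == 1) = false from rfl] at hih
        rw [List.foldl_cons, hstep, hih, hpg]

-- ===== VERDICT (by name: the statement is the Claim_ definition above) =====
theorem remove_ytdlp_format_args_spec : Claim_equal_remove_ytdlp_format_args := by
  intro cmd _
  unfold Spec_remove_ytdlp_format_args remove_ytdlp_format_args
  simp only [remove_ytdlp_format_args_alt]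
  rw [scan_eq]
  simp only [List.nil_append]
  rw [zipfilter_eq]
  have := foldA_eq cmd 0 []
  simpa using this
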